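-- pv_equiv track=rewrite | github.com/congvm-cs/bigo | Lesson_07/L07P09.py | checkMatch
-- ===== SOURCE A (Python) =====
-- def unique(x):
--     upper_ret = []
--     lower_ret = []
--     for _, i in enumerate(x):
--         if i not in upper_ret and i.isupper():
--             upper_ret.append(i)
--         elif i not in lower_ret and i.islower():
--             lower_ret.append(i)
--     return sorted(upper_ret), sorted(lower_ret)
--
-- def count(x):
--     x = list(x)
--     x_unique, _ = unique(x)
--     counter = [0]*len(x_unique)
--     for i in range(len(x_unique)):
--         counter[i] = x.count(x_unique[i])
--     return x_unique, counter
--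
-- def checkMatch(owner, guest, combination):
--     upper_ret_1, counter_1 = count(owner + guest)
--     upper_ret_2, counter_2 = count(combination)
--
--     if len(upper_ret_1) != len(upper_ret_2):
--         return "NO"
--
--     for a, b in zip(upper_ret_1, upper_ret_2):
--         if a != b:
--             return "NO"
--
--     for a, b in zip(counter_1, counter_2):
--         if a != b:
--             return "NO"
--     else:
--         return "YES"
-- ===== SOURCE B (Python) =====
-- def checkMatch(owner, guest, combination):
--     a = sorted(c for c in owner + guest if c.isupper())
--     b = sorted(c for c in combination if c.isupper())
--     return "YES" if a == b else "NO"
-- ===== Notes on version B (the rewrite author's own statement) =====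
-- stated objective: simpler
-- what changed: Replaces the unique-letter table plus repeated x.count scans and three comparison loops with a single sort-and-compare of each side's uppercase letters.
import Mathlib
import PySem

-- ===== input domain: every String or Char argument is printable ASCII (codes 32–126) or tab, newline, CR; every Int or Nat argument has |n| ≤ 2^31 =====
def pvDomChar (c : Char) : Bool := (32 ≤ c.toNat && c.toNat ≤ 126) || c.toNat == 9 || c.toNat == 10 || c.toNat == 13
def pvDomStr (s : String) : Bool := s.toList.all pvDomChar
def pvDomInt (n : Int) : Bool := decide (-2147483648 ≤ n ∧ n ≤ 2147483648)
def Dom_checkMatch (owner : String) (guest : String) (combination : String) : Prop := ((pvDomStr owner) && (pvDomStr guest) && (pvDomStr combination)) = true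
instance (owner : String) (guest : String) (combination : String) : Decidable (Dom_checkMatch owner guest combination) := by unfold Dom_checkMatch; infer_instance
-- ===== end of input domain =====

-- B replaces A's unique-letter table + repeated .count scans + three comparison loops
-- by sorting each side's uppercase letters once and comparing (objective: simpler).

-- ===== PORT A =====
-- one step of unique's loop body (branches in Python order)
def pvUniqueStep (acc : List Char × List Char) (i : Char) : List Char × List Char :=
  if ¬ acc.1.contains i ∧ PySem.Chars.isupper i then (acc.1 ++ [i], acc.2)
  else if ¬ acc.2.contains i ∧ PySem.Chars.islower i then (acc.1, acc.2 ++ [i])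
  else acc

-- def unique(x)
def pvUnique (x : List Char) : List Char × List Char :=
  let p := x.foldl pvUniqueStep ([], [])
  (PySem.List.sorted p.1 (fun c => c) false, PySem.List.sorted p.2 (fun c => c) false)

-- def count(x)
def pvCount (x : List Char) : List Char × List Int :=
  let xu := (pvUnique x).1
  let counter :=
    (PySem.List.pyRange 0 (xu.length : Int) 1).foldl
      (fun c i => PySem.List.pySetD c i ((x.count (PySem.List.pyGetD xu i ' ') : Int)))
      (List.replicate xu.length (0 : Int))
  (xu, counter)

def checkMatch (owner : String) (guest : String) (combination : String) : String :=
  let r1 := pvCount (owner ++ guest).toList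
  let r2 := pvCount combination.toList
  if r1.1.length ≠ r2.1.length then "NO"
  else if (r1.1.zip r2.1).any (fun p => p.1 != p.2) then "NO"
  else if (r1.2.zip r2.2).any (fun p => p.1 != p.2) then "NO"
  else "YES"

-- ===== PORT B =====
def checkMatch_alt (owner : String) (guest : String) (combination : String) : String :=
  let a := PySem.List.sorted ((owner ++ guest).toList.filter PySem.Chars.isupper) (fun c => c) false
  let b := PySem.List.sorted (combination.toList.filter PySem.Chars.isupper) (fun c => c) false
  if a = b then "YES" else "NO"

-- ===== PRECONDITION & SPEC =====
def Spec_checkMatch (owner : String) (guest : String) (combination : String) (out : String) : Prop := out = checkMatch_alt owner guest combination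
instance (owner : String) (guest : String) (combination : String) (out : String) : Decidable (Spec_checkMatch owner guest combination out) := by unfold Spec_checkMatch; infer_instance

-- ===== CLAIM (what is proved, stated in full; the proofs are below) =====
def Claim_equal_checkMatch : Prop := ∀ (owner : String) (guest : String) (combination : String), Dom_checkMatch owner guest combination → Spec_checkMatch owner guest combination (checkMatch owner guest combination)

-- ===== LEMMAS AND PROOFS =====

-- an ASCII char is never both upper and lower
lemma pv_not_lower_of_upper {c : Char} (h : PySem.Chars.isupper c = true) :
    PySem.Chars.islower c = false := by
  simp only [PySem.Chars.isupper, Bool.and_eq_true, decide_eq_true_eq] at h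
  have hz : ('Z' : Char) < 'a' := by decide
  simp only [PySem.Chars.islower, Bool.and_eq_false_iff, decide_eq_false_iff_not]
  exact Or.inl (not_le.mpr (lt_of_le_of_lt h.2 hz))

-- the first component of unique's loop collects the distinct uppercase chars, in order
lemma pvFoldFst (x : List Char) : ∀ p : List Char × List Char,
    (x.foldl pvUniqueStep p).1
      = x.foldl (fun u i => if PySem.Chars.isupper i then PySem.Set.add u i else u) p.1 := by
  induction x with
  | nil => intro p; rfl
  | cons i x ih =>
    intro p
    simp only [List.foldl_cons]
    rw [ih]
    congr 1
    by_cases hu : PySem.Chars.isupper i = true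
    · have hl := pv_not_lower_of_upper hu
      by_cases hc : p.1.contains i = true
      · have hm : i ∈ p.1 := by simpa using hc
        simp [pvUniqueStep, PySem.Set.add, hu, hm, hl]
      · have hm : i ∉ p.1 := by simpa using hc
        simp [pvUniqueStep, PySem.Set.add, hu, hm]
    · simp only [Bool.not_eq_true] at hu
      simp only [pvUniqueStep, PySem.Set.add, hu, Bool.false_eq_true, and_false, if_false]
      split_ifs <;> rfl

lemma pvUnique_fst (x : List Char) :
    (pvUnique x).1
      = PySem.List.sorted (PySem.Set.ofList (x.filter PySem.Chars.isupper)) (fun c => c) false := by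
  have h : (x.foldl pvUniqueStep ([], [])).1
      = (x.filter PySem.Chars.isupper).foldl PySem.Set.add ([] : List Char) := by
    rw [pvFoldFst, List.foldl_filter]
  simp only [pvUnique, h, PySem.Set.ofList_eq_foldl]

-- the counter-filling loop writes x.count(u[i]) at every position
lemma pvFill (x u : List Char) : ∀ k : Nat, k ≤ u.length →
    (PySem.List.pyRange 0 (k : Int) 1).foldl
      (fun c i => PySem.List.pySetD c i ((x.count (PySem.List.pyGetD u i ' ') : Int)))
      (List.replicate u.length (0 : Int))
    = (u.take k).map (fun v => (x.count v : Int)) ++ List.replicate (u.length - k) (0 : Int) := by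
  intro k
  induction k with
  | zero => intro _; simp [PySem.List.pyRange_one_eq_nil]
  | succ k ih =>
    intro hk
    have hk' : k ≤ u.length := Nat.le_of_succ_le hk
    have hlt : k < u.length := hk
    have hsplit : PySem.List.pyRange 0 ((k + 1 : Nat) : Int) 1
        = PySem.List.pyRange 0 (k : Int) 1 ++ [(k : Int)] := by
      have := PySem.List.pyRange_one_succ_right (a := 0) (b := (k : Int)) (by positivity)
      push_cast
      push_cast at this
      exact this
    rw [hsplit, List.foldl_append, ih hk']
    simp only [List.foldl_cons, List.foldl_nil]
    rw [PySem.List.pySetD_natCast, PySem.List.pyGetD_natCast]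
    have hrep : u.length - k = (u.length - (k + 1)) + 1 := by omega
    rw [hrep, List.replicate_succ]
    have hlen : ((u.take k).map (fun v => (x.count v : Int))).length = k := by
      simp [List.length_take, Nat.min_eq_left hk']
    rw [List.set_append_right _ _ (by omega)]
    have : u.getD k ' ' = u[k] := by
      simp [List.getD, List.getElem?_eq_getElem hlt]
    rw [this, hlen]
    simp only [Nat.sub_self, List.set_cons_zero]
    rw [show u.take (k+1) = u.take k ++ [u[k]] from by
      rw [List.take_add_one, List.getElem?_eq_getElem hlt]; simp]
    simp only [List.map_append, List.map_cons, List.map_nil, List.append_assoc,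
      List.singleton_append]

lemma pvCount_eq (x : List Char) :
    pvCount x = ((pvUnique x).1, (pvUnique x).1.map (fun v => (x.count v : Int))) := by
  have h := pvFill x (pvUnique x).1 (pvUnique x).1.length le_rfl
  simp only [Nat.sub_self, List.replicate_zero, List.append_nil, List.take_length] at h
  simp [pvCount, h]

-- 'any (p.1 != p.2)' over a zip of equal-length lists is false exactly when the lists are equal
lemma pvZipAny {α : Type} [DecidableEq α] :
    ∀ (l1 l2 : List α), l1.length = l2.length →
      (((l1.zip l2).any (fun p => p.1 != p.2)) = false ↔ l1 = l2) := by
  intro l1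
  induction l1 with
  | nil => intro l2 h; cases l2 <;> simp_all
  | cons a l1 ih =>
    intro l2 h
    cases l2 with
    | nil => simp at h
    | cons b l2 =>
      simp only [List.zip_cons_cons, List.any_cons, Bool.or_eq_false_iff, bne_eq_false_iff_eq,
        List.cons.injEq]
      constructor
      · rintro ⟨h1, h2⟩
        exact ⟨h1, (ih l2 (by simpa using h)).mp h2⟩
      · rintro ⟨h1, h2⟩
        exact ⟨h1, (ih l2 (by simpa using h)).mpr h2⟩

-- the heart of the equivalence: equal sorted unique uppers + equal per-letter counts
-- ↔ equal sorted uppercase multisets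
lemma pvMain (s t : List Char) :
    (PySem.List.sorted (PySem.Set.ofList (s.filter PySem.Chars.isupper)) (fun c => c) false
        = PySem.List.sorted (PySem.Set.ofList (t.filter PySem.Chars.isupper)) (fun c => c) false
      ∧ (PySem.List.sorted (PySem.Set.ofList (s.filter PySem.Chars.isupper)) (fun c => c) false).map
          (fun v => (s.count v : Int))
        = (PySem.List.sorted (PySem.Set.ofList (t.filter PySem.Chars.isupper)) (fun c => c) false).map
          (fun v => (t.count v : Int)))
    ↔ PySem.List.sorted (s.filter PySem.Chars.isupper) (fun c => c) false
        = PySem.List.sorted (t.filter PySem.Chars.isupper) (fun c => c) false := by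
  set F := s.filter PySem.Chars.isupper with hF
  set G := t.filter PySem.Chars.isupper with hG
  have hmemF : ∀ v, v ∈ PySem.List.sorted (PySem.Set.ofList F) (fun c => c) false ↔ v ∈ F := by
    intro v; rw [PySem.List.mem_sorted, PySem.Set.mem_ofList]
  have hmemG : ∀ v, v ∈ PySem.List.sorted (PySem.Set.ofList G) (fun c => c) false ↔ v ∈ G := by
    intro v; rw [PySem.List.mem_sorted, PySem.Set.mem_ofList]
  have hupF : ∀ v, v ∈ F → PySem.Chars.isupper v = true := by
    intro v hv; exact (List.mem_filter.mp hv).2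
  have hupG : ∀ v, v ∈ G → PySem.Chars.isupper v = true := by
    intro v hv; exact (List.mem_filter.mp hv).2
  constructor
  · rintro ⟨hU, hC⟩
    rw [PySem.List.sorted_id_eq_sorted_id_iff_perm, List.perm_iff_count]
    intro a
    by_cases ha : a ∈ F
    · have haU : a ∈ PySem.List.sorted (PySem.Set.ofList F) (fun c => c) false := (hmemF a).mpr ha
      rw [hU] at hC
      have := (List.map_inj_left.mp hC) a (by rwa [← hU])
      have hcnt : s.count a = t.count a := by exact_mod_cast this
      rw [hF, hG, List.count_filter (hupF a ha), List.count_filter (hupF a ha)]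
      exact hcnt
    · have hb : a ∉ G := by
        intro hbG
        exact ha ((hmemF a).mp (hU ▸ (hmemG a).mpr hbG))
      rw [List.count_eq_zero.mpr ha, List.count_eq_zero.mpr hb]
  · intro hsort
    have hperm : F.Perm G := (PySem.List.sorted_id_eq_sorted_id_iff_perm F G).mp hsort
    have hpermU : (PySem.Set.ofList F).Perm (PySem.Set.ofList G) := by
      rw [List.perm_ext_iff_of_nodup (PySem.Set.nodup_ofList F) (PySem.Set.nodup_ofList G)]
      intro a
      rw [PySem.Set.mem_ofList, PySem.Set.mem_ofList]
      exact ⟨fun h => hperm.mem_iff.mp h, fun h => hperm.mem_iff.mpr h⟩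
    have hU : PySem.List.sorted (PySem.Set.ofList F) (fun c => c) false
        = PySem.List.sorted (PySem.Set.ofList G) (fun c => c) false :=
      (PySem.List.sorted_id_eq_sorted_id_iff_perm _ _).mpr hpermU
    refine ⟨hU, ?_⟩
    rw [hU]
    apply List.map_congr_left
    intro a haU
    have haG : a ∈ G := (hmemG a).mp haU
    have hcF : F.count a = G.count a := List.perm_iff_count.mp hperm a
    have h1 : List.count a F = List.count a s := List.count_filter (hupG a haG)
    have h2 : List.count a G = List.count a t := List.count_filter (hupG a haG)
    have : s.count a = t.count a := by rw [← h1, hcF, h2]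
    exact_mod_cast this

-- ===== VERDICT (by name: the statement is the Claim_ definition above) =====
theorem checkMatch_spec : Claim_equal_checkMatch := by
  intro owner guest combination _
  unfold Spec_checkMatch checkMatch checkMatch_alt
  rw [pvCount_eq, pvCount_eq, pvUnique_fst, pvUnique_fst]
  set s := (owner ++ guest).toList
  set t := combination.toList
  set U1 := PySem.List.sorted (PySem.Set.ofList (s.filter PySem.Chars.isupper)) (fun c => c) false with hU1
  set U2 := PySem.List.sorted (PySem.Set.ofList (t.filter PySem.Chars.isupper)) (fun c => c) false with hU2
  simp only
  by_cases hsort : PySem.List.sorted (s.filter PySem.Chars.isupper) (fun c => c) false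
      = PySem.List.sorted (t.filter PySem.Chars.isupper) (fun c => c) false
  · obtain ⟨hU, hC⟩ := (pvMain s t).mpr hsort
    have hUU : U1 = U2 := by rw [hU1, hU2]; exact hU
    have hCC : U1.map (fun v => (s.count v : Int)) = U2.map (fun v => (t.count v : Int)) := by
      rw [hU1, hU2]; exact hC
    have hlen : U1.length = U2.length := by rw [hUU]
    rw [if_neg (by simp [hlen]), if_neg (by rw [(pvZipAny U1 U2 hlen).mpr hUU]; simp),
      if_neg (by rw [(pvZipAny _ _ (by simp [hUU])).mpr hCC]; simp), if_pos hsort]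
  · rw [if_neg hsort]
    by_cases h1 : U1.length = U2.length
    · rw [if_neg (by simp [h1])]
      by_cases h2 : (U1.zip U2).any (fun p => p.1 != p.2) = false
      · have hU : U1 = U2 := (pvZipAny U1 U2 h1).mp h2
        rw [h2, if_neg (by simp)]
        by_cases h3 : ((U1.map (fun v => (s.count v : Int))).zip
            (U2.map (fun v => (t.count v : Int)))).any (fun p => p.1 != p.2) = false
        · exfalso
          have hC := (pvZipAny _ _ (by simp [hU])).mp h3
          exact hsort ((pvMain s t).mp ⟨by rw [← hU1, ← hU2]; exact hU, by rw [← hU1, ← hU2]; exact hC⟩)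
        · simp only [Bool.not_eq_false] at h3
          rw [if_pos h3]
      · simp only [Bool.not_eq_false] at h2
        rw [if_pos h2]
    · rw [if_pos (by simp [h1])]
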